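-- pv_equiv track=rewrite | github.com/MT444M/PhishGard | backend/core/url_orchestrator.py | _format_issuer
-- ===== SOURCE A (Python) =====
-- def _format_issuer(issuer):
--     """Simplifie la structure de l'émetteur du certificat en une chaîne plus robuste."""
--     if not issuer or not isinstance(issuer, tuple):
--         return "N/A"
--
--     try:
--         # Cette nouvelle logique parcourt toutes les parties du tuple
--         # pour construire un dictionnaire, ce qui est plus fiable.
--         issuer_dict = {}
--         for part in issuer:
--             for key, value in part:
--                 issuer_dict[key] = value
--
--         org = issuer_dict.get('organizationName', '')
--         cn = issuer_dict.get('commonName', '')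
--         country = issuer_dict.get('countryName', '')
--
--         # On privilégie le nom le plus descriptif (commonName ou organizationName)
--         main_name = cn or org
--         if main_name and country:
--             return f"{main_name} ({country})"
--         return main_name or "N/A"
--
--     except (ValueError, TypeError):
--         # Fallback si la structure est vraiment inattendue
--         return str(issuer)
-- ===== SOURCE B (Python) =====
-- def _format_issuer(issuer):
--     """Simplifie la structure de l'émetteur du certificat en une chaîne plus robuste."""
--     if not issuer or not isinstance(issuer, tuple):
--         return "N/A"
--     try:
--         def find(name):
--             # last matching value wins, like dict overwrite in A
--             found = ''
--             for part in issuer: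
--                 for key, value in part:
--                     if key == name:
--                         found = value
--             return found
--
--         cn = find('commonName')
--         org = find('organizationName')
--         country = find('countryName')
--
--         main_name = cn or org
--         if main_name and country:
--             return f"{main_name} ({country})"
--         return main_name or "N/A"
--     except (ValueError, TypeError):
--         return str(issuer)
-- ===== Notes on version B (the rewrite author's own statement) =====
-- stated objective: simpler
-- what changed: Drops the intermediate dict entirely: a small find(name) helper scans the tuple once per wanted key, keeping the last matching value (matching dict overwrite), instead of building a dictionary and doing .get lookups.
import Mathlib
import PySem

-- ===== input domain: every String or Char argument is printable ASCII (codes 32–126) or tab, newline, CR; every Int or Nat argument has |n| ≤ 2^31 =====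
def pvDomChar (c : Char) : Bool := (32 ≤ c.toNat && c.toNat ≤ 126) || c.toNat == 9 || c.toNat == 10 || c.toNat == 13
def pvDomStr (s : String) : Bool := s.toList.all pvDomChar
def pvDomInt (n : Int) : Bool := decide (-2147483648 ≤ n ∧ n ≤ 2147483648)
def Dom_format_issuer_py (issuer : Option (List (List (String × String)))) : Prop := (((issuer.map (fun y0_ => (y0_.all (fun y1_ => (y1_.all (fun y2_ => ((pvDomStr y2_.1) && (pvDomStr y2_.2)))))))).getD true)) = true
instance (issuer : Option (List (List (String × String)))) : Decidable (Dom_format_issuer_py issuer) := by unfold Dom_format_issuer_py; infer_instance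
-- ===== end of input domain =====

-- B drops A's intermediate dict for a direct last-match scan per wanted key (objective: simpler).

-- ===== PORT A =====
-- builds a dict from all (key, value) pairs (later pairs overwrite), then formats via .get lookups
def format_issuer_py (issuer : Option (List (List (String × String)))) : String :=
  match issuer with
  | none => "N/A"
  | some parts =>
    if parts = [] then "N/A"
    else
      let issuer_dict :=
        parts.foldl (fun d part => part.foldl (fun d kv => d.insert kv.1 kv.2) d) PySem.Dict.empty
      let org := issuer_dict.getD "organizationName" ""
      let cn := issuer_dict.getD "commonName" ""
      let country := issuer_dict.getD "countryName" ""
      let main_name := if cn == "" then org else cn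
      if main_name ≠ "" ∧ country ≠ "" then main_name ++ " (" ++ country ++ ")"
      else if main_name ≠ "" then main_name else "N/A"

-- ===== PORT B =====
-- find(name): scan all parts/pairs, keep the last value whose key equals name, '' if none
def pvFindLast (parts : List (List (String × String))) (name : String) : String :=
  parts.foldl (fun found part =>
    part.foldl (fun found kv => if kv.1 == name then kv.2 else found) found) ""

def format_issuer_py_alt (issuer : Option (List (List (String × String)))) : String :=
  match issuer with
  | none => "N/A"
  | some parts =>
    if parts = [] then "N/A"
    else
      let cn := pvFindLast parts "commonName"
      let org := pvFindLast parts "organizationName"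
      let country := pvFindLast parts "countryName"
      let main_name := if cn == "" then org else cn
      if main_name ≠ "" ∧ country ≠ "" then main_name ++ " (" ++ country ++ ")"
      else if main_name ≠ "" then main_name else "N/A"

-- ===== PRECONDITION & SPEC =====
def Spec_format_issuer_py (issuer : Option (List (List (String × String)))) (out : String) : Prop := out = format_issuer_py_alt issuer
instance (issuer : Option (List (List (String × String)))) (out : String) : Decidable (Spec_format_issuer_py issuer out) := by unfold Spec_format_issuer_py; infer_instance

-- ===== CLAIM (what is proved, stated in full; the proofs are below) =====
def Claim_equal_format_issuer_py : Prop := ∀ (issuer : Option (List (List (String × String)))), Dom_format_issuer_py issuer → Spec_format_issuer_py issuer (format_issuer_py issuer)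

-- ===== LEMMAS AND PROOFS =====

-- last-wins scan of one part equals dict-build then lookup
theorem getD_foldl_insert_pairs (pairs : List (String × String)) (d : PySem.Dict String String) (k : String) :
    (pairs.foldl (fun d kv => d.insert kv.1 kv.2) d).getD k "" =
      pairs.foldl (fun found kv => if kv.1 == k then kv.2 else found) (d.getD k "") := by
  induction pairs generalizing d with
  | nil => rfl
  | cons p rest ih =>
    simp only [List.foldl_cons, ih, PySem.Dict.getD_insert]
    by_cases h : p.1 = k
    · simp [h]
    · simp [h, Ne.symm h]

theorem getD_build_eq_findLast (parts : List (List (String × String))) (d : PySem.Dict String String) (k : String) :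
    (parts.foldl (fun d part => part.foldl (fun d kv => d.insert kv.1 kv.2) d) d).getD k "" =
      parts.foldl (fun found part =>
        part.foldl (fun found kv => if kv.1 == k then kv.2 else found) found) (d.getD k "") := by
  induction parts generalizing d with
  | nil => rfl
  | cons part rest ih =>
    simp only [List.foldl_cons, ih, getD_foldl_insert_pairs]

-- ===== VERDICT (by name: the statement is the Claim_ definition above) =====
theorem format_issuer_py_spec : Claim_equal_format_issuer_py := by
  intro issuer _
  show format_issuer_py issuer = format_issuer_py_alt issuer
  cases issuer with
  | none => rfl
  | some parts =>
    simp only [format_issuer_py, format_issuer_py_alt, pvFindLast,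
      getD_build_eq_findLast, PySem.Dict.getD_empty]
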